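-- pv_equiv track=rewrite | github.com/athenarc/experimental-analysis-of-value-linking | utils/data_explorer.py | check_valid_transposition
-- ===== SOURCE A (Python) =====
-- def check_valid_transposition(original_value: str, altered_value: str) -> bool:
--     if original_value == altered_value:
--         return False
--     if len(original_value) != len(altered_value):
--         return False
--     differences = []
--     for i in range(len(original_value)):
--         if original_value[i] != altered_value[i]:
--             differences.append(i)
--     if len(differences) != 2:
--         return False
--     i, j = differences
--     return (j == i + 1 and
--             original_value[i] == altered_value[j] and
--             original_value[j] == altered_value[i])
-- ===== SOURCE B (Python) =====
-- def check_valid_transposition(original_value: str, altered_value: str) -> bool: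
--     n = len(original_value)
--     if n != len(altered_value):
--         return False
--     i = 0
--     while i < n and original_value[i] == altered_value[i]:
--         i += 1
--     if i >= n:
--         return False  # strings are equal
--     return (i + 1 < n
--             and original_value[i] == altered_value[i + 1]
--             and original_value[i + 1] == altered_value[i]
--             and original_value[i + 2:] == altered_value[i + 2:])
-- ===== Notes on version B (the rewrite author's own statement) =====
-- stated objective: simpler
-- what changed: Instead of collecting every differing index into a list and pattern-matching its length, B stops at the FIRST mismatch and then checks the adjacent swap plus equality of the remaining suffix by one slice comparison.
import Mathlib
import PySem

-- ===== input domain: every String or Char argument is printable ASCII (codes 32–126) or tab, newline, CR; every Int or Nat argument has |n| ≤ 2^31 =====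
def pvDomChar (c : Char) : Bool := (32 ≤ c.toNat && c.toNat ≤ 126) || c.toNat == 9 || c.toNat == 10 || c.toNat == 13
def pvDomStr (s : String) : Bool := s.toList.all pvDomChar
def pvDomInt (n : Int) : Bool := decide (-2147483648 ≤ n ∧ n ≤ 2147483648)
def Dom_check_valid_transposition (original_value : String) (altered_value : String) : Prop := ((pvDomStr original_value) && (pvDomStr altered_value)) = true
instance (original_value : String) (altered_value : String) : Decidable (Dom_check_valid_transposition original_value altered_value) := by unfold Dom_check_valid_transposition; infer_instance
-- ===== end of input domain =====

-- B is simpler: it stops at the first mismatch and compares the remaining suffix once,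
-- instead of collecting all differing indices into a list; return values agree everywhere.

-- ===== PORT A =====
-- literal port of A: collect all differing indices, demand exactly two, adjacent and swapped
def check_valid_transposition (original_value : String) (altered_value : String) : Bool :=
  let ol := original_value.toList
  let al := altered_value.toList
  if original_value == altered_value then false
  else if ol.length ≠ al.length then false
  else
    let differences := (List.range ol.length).foldl
      (fun acc i => if ol.getD i ' ' ≠ al.getD i ' ' then acc ++ [i] else acc) []
    match differences with
    | [i, j] =>
        decide (j = i + 1) && (ol.getD i ' ' == al.getD j ' ') && (ol.getD j ' ' == al.getD i ' ')
    | _ => false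

-- ===== PORT B =====
-- B's while-loop scanning for the first differing position (none = no mismatch)
def pvFirstMismatch : List Char → List Char → Option Nat
  | [], _ => none
  | c :: ol, al =>
      match al with
      | [] => none
      | d :: al => if c = d then (pvFirstMismatch ol al).map (· + 1) else some 0

def check_valid_transposition_alt (original_value : String) (altered_value : String) : Bool :=
  let ol := original_value.toList
  let al := altered_value.toList
  if ol.length ≠ al.length then false
  else
    match pvFirstMismatch ol al with
    | none => false
    | some i =>
        decide (i + 1 < ol.length) && (ol.getD i ' ' == al.getD (i + 1) ' ')
          && (ol.getD (i + 1) ' ' == al.getD i ' ')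
          && (ol.drop (i + 2) == al.drop (i + 2))

-- ===== PRECONDITION & SPEC =====
def Spec_check_valid_transposition (original_value : String) (altered_value : String) (out : Bool) : Prop := out = check_valid_transposition_alt original_value altered_value
instance (original_value : String) (altered_value : String) (out : Bool) : Decidable (Spec_check_valid_transposition original_value altered_value out) := by unfold Spec_check_valid_transposition; infer_instance

-- ===== CLAIM (what is proved, stated in full; the proofs are below) =====
def Claim_equal_check_valid_transposition : Prop := ∀ (original_value : String) (altered_value : String), Dom_check_valid_transposition original_value altered_value → Spec_check_valid_transposition original_value altered_value (check_valid_transposition original_value altered_value)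

-- ===== LEMMAS AND PROOFS =====

-- the list of differing indices, recursively
def pvDiffsL : List Char → List Char → List Nat
  | c :: ol, d :: al =>
      if c = d then (pvDiffsL ol al).map (· + 1)
      else 0 :: (pvDiffsL ol al).map (· + 1)
  | _, _ => []

-- common core of both ports (on equal-length lists)
def pvCore : List Char → List Char → Bool
  | c :: ol, d :: al =>
      if c = d then pvCore ol al
      else match ol, al with
        | e :: ol', f :: al' => (c == f) && (e == d) && (ol' == al')
        | _, _ => false
  | _, _ => false

lemma pvDiffsL_nil_iff : ∀ (ol al : List Char), ol.length = al.length →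
    (pvDiffsL ol al = [] ↔ ol = al) := by
  intro ol
  induction ol with
  | nil => intro al h; cases al <;> simp [pvDiffsL] at h ⊢
  | cons c ol ih =>
    intro al h
    cases al with
    | nil => simp at h
    | cons d al =>
      simp only [List.length_cons, Nat.add_right_cancel_iff] at h
      by_cases hcd : c = d
      · simp [pvDiffsL, hcd, ih al h]
      · simp [pvDiffsL, hcd]

lemma pvFirstMismatch_self : ∀ (l : List Char), pvFirstMismatch l l = none := by
  intro l; induction l with
  | nil => rfl
  | cons c l ih => simp [pvFirstMismatch, ih]

lemma pvRange_filter_eq_diffs : ∀ (ol al : List Char), ol.length = al.length →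
    (List.range ol.length).filter (fun i => decide (ol.getD i ' ' ≠ al.getD i ' '))
      = pvDiffsL ol al := by
  intro ol
  induction ol with
  | nil => intro al h; simp [pvDiffsL]
  | cons c ol ih =>
    intro al h
    cases al with
    | nil => simp at h
    | cons d al =>
      simp only [List.length_cons, Nat.add_right_cancel_iff] at h
      simp only [List.length_cons]
      rw [List.range_succ_eq_map, List.filter_cons, List.filter_map]
      have hmap : (List.range ol.length).filter
          ((fun i => decide ((c :: ol).getD i ' ' ≠ (d :: al).getD i ' ')) ∘ Nat.succ)
          = (List.range ol.length).filter (fun i => decide (ol.getD i ' ' ≠ al.getD i ' ')) := by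
        apply List.filter_congr
        intro i _
        simp [Function.comp]
      rw [hmap, ih al h]
      by_cases hcd : c = d
      · simp [pvDiffsL, hcd]
      · simp [pvDiffsL, hcd]

-- A's final match over the list of differing indices equals the common core
lemma pvA_eq_core : ∀ (ol al : List Char), ol.length = al.length →
    (match pvDiffsL ol al with
     | [i, j] =>
        decide (j = i + 1) && (ol.getD i ' ' == al.getD j ' ') && (ol.getD j ' ' == al.getD i ' ')
     | _ => false) = pvCore ol al := by
  intro ol
  induction ol with
  | nil => intro al h; cases al <;> simp_all [pvDiffsL, pvCore]
  | cons c ol ih =>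
    intro al h
    cases al with
    | nil => simp at h
    | cons d al =>
      simp only [List.length_cons, Nat.add_right_cancel_iff] at h
      by_cases hcd : c = d
      · -- heads equal: everything shifts by one
        rw [show pvDiffsL (c :: ol) (d :: al) = (pvDiffsL ol al).map (· + 1) by
              simp [pvDiffsL, hcd]]
        rw [show pvCore (c :: ol) (d :: al) = pvCore ol al by simp [pvCore, hcd]]
        rw [← ih al h]
        rcases pvDiffsL ol al with _ | ⟨i, _ | ⟨j, _ | ⟨k, t⟩⟩⟩ <;> simp
      · -- heads differ: index 0 is in the difference list
        cases ol with
        | nil =>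
          cases al with
          | nil => simp [pvDiffsL, pvCore, hcd]
          | cons f al' => simp at h
        | cons e ol' =>
          cases al with
          | nil => simp at h
          | cons f al' =>
            simp only [List.length_cons, Nat.add_right_cancel_iff] at h
            have hC : pvCore (c :: e :: ol') (d :: f :: al')
                = ((c == f) && (e == d) && (ol' == al')) := by
              simp [pvCore, hcd]
            rw [hC]
            by_cases hef : e = f
            · subst hef
              have hR : ((c == e) && (e == d) && (ol' == al')) = false := by
                by_cases h1 : c = e
                · by_cases h2 : e = d
                  · exact absurd (h1.trans h2) hcd
                  · simp [h2]
                · simp [h1]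
              rw [hR]
              rw [show pvDiffsL (c :: e :: ol') (d :: e :: al')
                    = 0 :: ((pvDiffsL ol' al').map (· + 1)).map (· + 1) by
                    simp [pvDiffsL, hcd]]
              rcases pvDiffsL ol' al' with _ | ⟨i, _ | ⟨j, t⟩⟩ <;> simp
            · rw [show pvDiffsL (c :: e :: ol') (d :: f :: al')
                    = 0 :: 1 :: ((pvDiffsL ol' al').map (· + 1)).map (· + 1) by
                    simp [pvDiffsL, hcd, hef]]
              rcases hD : pvDiffsL ol' al' with _ | ⟨i, t⟩
              · have : ol' = al' := (pvDiffsL_nil_iff ol' al' h).1 hD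
                subst this
                simp [List.getD]
              · have hne : (ol' == al') = false := by
                  simp only [beq_eq_false_iff_ne, ne_eq]
                  intro he
                  rw [he, (pvDiffsL_nil_iff al' al' rfl).2 rfl] at hD
                  simp at hD
                simp [hne]

-- B's check over the first mismatch equals the common core
lemma pvB_eq_core : ∀ (ol al : List Char), ol.length = al.length →
    (match pvFirstMismatch ol al with
     | none => false
     | some i =>
        decide (i + 1 < ol.length) && (ol.getD i ' ' == al.getD (i + 1) ' ')
          && (ol.getD (i + 1) ' ' == al.getD i ' ')
          && (ol.drop (i + 2) == al.drop (i + 2))) = pvCore ol al := by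
  intro ol
  induction ol with
  | nil => intro al h; cases al <;> simp_all [pvFirstMismatch, pvCore]
  | cons c ol ih =>
    intro al h
    cases al with
    | nil => simp at h
    | cons d al =>
      simp only [List.length_cons, Nat.add_right_cancel_iff] at h
      by_cases hcd : c = d
      · rw [show pvFirstMismatch (c :: ol) (d :: al) = (pvFirstMismatch ol al).map (· + 1) by
              simp [pvFirstMismatch, hcd]]
        rw [show pvCore (c :: ol) (d :: al) = pvCore ol al by simp [pvCore, hcd]]
        rw [← ih al h]
        rcases pvFirstMismatch ol al with _ | i
        · rfl
        · simp only [Option.map_some, List.getD_cons_succ, List.length_cons,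
            Nat.add_lt_add_iff_right]
          rw [show i + 1 + 2 = i + 2 + 1 from rfl]
          simp [List.drop_succ_cons]
      · rw [show pvFirstMismatch (c :: ol) (d :: al) = some 0 by simp [pvFirstMismatch, hcd]]
        cases ol with
        | nil =>
          cases al with
          | nil => simp [pvCore, hcd]
          | cons f al' => simp at h
        | cons e ol' =>
          cases al with
          | nil => simp at h
          | cons f al' => simp [pvCore, hcd]

-- ===== VERDICT (by name: the statement is the Claim_ definition above) =====
theorem check_valid_transposition_spec : Claim_equal_check_valid_transposition := by
  intro o a _
  unfold Spec_check_valid_transposition check_valid_transposition check_valid_transposition_alt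
  by_cases hlen : o.toList.length = a.toList.length
  · by_cases heq : o = a
    · subst heq
      simp [pvFirstMismatch_self]
    · have hbeq : (o == a) = false := by simp [heq]
      rw [hbeq]
      have hne : ¬ o.toList.length ≠ a.toList.length := fun hc => hc hlen
      simp only [Bool.false_eq_true, if_false, if_neg hne]
      rw [PySem.List.foldl_append_ite_eq_filter]
      simp only [List.nil_append]
      rw [pvRange_filter_eq_diffs o.toList a.toList hlen,
          pvA_eq_core o.toList a.toList hlen, ← pvB_eq_core o.toList a.toList hlen]
  · have hlen' : ¬ o.length = a.length := by simpa using hlen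
    have heq' : o ≠ a := fun he => hlen (by rw [he])
    have hbeq : (o == a) = false := by simp [heq']
    rw [hbeq]
    simp [hlen']
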